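-- pv_equiv track=rewrite | github.com/IPOR-Labs/ipor-fusion.py | src/ipor_fusion/core/contract.py | _parse_param_types
-- ===== SOURCE A (Python) =====
-- def _parse_param_types(signature: str) -> list[str]:
--     if not (params := signature[signature.index("(") + 1 : signature.rindex(")")]):
--         return []
--     result = []
--     depth = 0
--     current: list[str] = []
--     for char in params:
--         if char == "(":
--             depth += 1
--             current.append(char)
--         elif char == ")":
--             depth -= 1
--             current.append(char)
--         elif char == "," and depth == 0:
--             result.append("".join(current).strip())
--             current = []
--         else:
--             current.append(char)
--     if last := "".join(current).strip():
--         result.append(last)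
--     return result
-- ===== SOURCE B (Python) =====
-- def _parse_param_types(signature: str) -> list[str]:
--     params = signature[signature.index("(") + 1 : signature.rindex(")")]
--     if not params:
--         return []
--     segments: list[str] = []
--     buf = None
--     for piece in params.split(","):
--         buf = piece if buf is None else buf + "," + piece
--         if buf.count("(") == buf.count(")"):
--             segments.append(buf.strip())
--             buf = None
--     last = segments.pop() if buf is None else buf.strip()
--     if last:
--         segments.append(last)
--     return segments
-- ===== Notes on version B (the rewrite author's own statement) =====
-- stated objective: alternative
-- what changed: B splits the parameter substring on every comma and re-merges adjacent pieces until their parenthesis counts balance, instead of A's character-by-character scan that tracks nesting depth and accumulates characters.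
import Mathlib
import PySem

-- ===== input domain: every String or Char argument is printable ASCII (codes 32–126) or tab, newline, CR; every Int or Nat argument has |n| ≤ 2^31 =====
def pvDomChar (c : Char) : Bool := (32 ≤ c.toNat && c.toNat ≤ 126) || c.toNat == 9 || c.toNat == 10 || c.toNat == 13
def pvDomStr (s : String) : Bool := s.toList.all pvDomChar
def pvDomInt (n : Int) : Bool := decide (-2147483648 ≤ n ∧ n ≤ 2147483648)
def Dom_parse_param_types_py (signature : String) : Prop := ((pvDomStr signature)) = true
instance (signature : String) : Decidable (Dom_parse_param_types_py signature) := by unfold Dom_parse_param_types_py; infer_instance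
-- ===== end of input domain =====

-- B replaces A's character-by-character depth scanner by split-on-every-comma followed by re-merging
-- adjacent pieces until their parentheses balance (objective: alternative decomposition, same results).

-- ===== PORT A =====
-- params = signature[signature.index("(") + 1 : signature.rindex(")")]  (shared by both sources verbatim)
def pvParams (signature : String) : List Char :=
  let s := signature.toList
  PySem.List.slice s (some (PySem.Chars.find s ['('] + 1)) (some (PySem.Chars.rfind s [')']))

-- loop body of A: state = (result, depth, current)
def pvAStep (st : List String × Int × List Char) (c : Char) : List String × Int × List Char :=
  if c = '(' then (st.1, st.2.1 + 1, st.2.2 ++ [c])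
  else if c = ')' then (st.1, st.2.1 - 1, st.2.2 ++ [c])
  else if c = ',' ∧ st.2.1 = 0 then (st.1 ++ [String.ofList (PySem.Chars.strip st.2.2)], st.2.1, [])
  else (st.1, st.2.1, st.2.2 ++ [c])

def parse_param_types_py (signature : String) : List String :=
  let params := pvParams signature
  if params = [] then []
  else
    let st := params.foldl pvAStep ([], 0, [])
    let last := PySem.Chars.strip st.2.2
    if last ≠ [] then st.1 ++ [String.ofList last] else st.1

-- ===== PORT B =====
-- loop body of B: state = (segments, buf); buf = none right after a balanced piece was closed
def pvBStep (st : List String × Option (List Char)) (piece : List Char) : List String × Option (List Char) :=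
  let b := match st.2 with | none => piece | some old => old ++ ',' :: piece
  if PySem.Chars.count b ['('] = PySem.Chars.count b [')'] then
    (st.1 ++ [String.ofList (PySem.Chars.strip b)], none)
  else (st.1, some b)

def parse_param_types_py_alt (signature : String) : List String :=
  let params := pvParams signature
  if params = [] then []
  else
    let st := (PySem.Chars.splitOn params [',']).foldl pvBStep ([], none)
    -- last = segments.pop() if buf is None else buf.strip(); if last: segments.append(last)
    match st.2 with
    | none =>
        let last := st.1.getLastD ""
        if last.toList ≠ [] then st.1.dropLast ++ [last] else st.1.dropLast
    | some b =>
        let last := PySem.Chars.strip b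
        if last ≠ [] then st.1 ++ [String.ofList last] else st.1

-- ===== PRECONDITION & SPEC =====
-- A raises ValueError (str.index / str.rindex) exactly when an opening or a closing parenthesis is missing from signature.
def Pre_parse_param_types_py (signature : String) : Prop :=
  PySem.Str.isIn "(" signature = true ∧ PySem.Str.isIn ")" signature = true
instance (signature : String) : Decidable (Pre_parse_param_types_py signature) := by
  unfold Pre_parse_param_types_py; infer_instance
def pvWitness_parse_param_types_py : String := "transfer(uint256 amount, (address, bytes)[] calls)"

def Spec_parse_param_types_py (signature : String) (out : List String) : Prop :=
  out = parse_param_types_py_alt signature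
instance (signature : String) (out : List String) : Decidable (Spec_parse_param_types_py signature out) := by
  unfold Spec_parse_param_types_py; infer_instance

-- ===== CLAIM (what is proved, stated in full; the proofs are below) =====
def Claim_equal_parse_param_types_py : Prop := ∀ (signature : String), Dom_parse_param_types_py signature → Pre_parse_param_types_py signature → Spec_parse_param_types_py signature (parse_param_types_py signature)

-- ===== LEMMAS AND PROOFS =====

-- paren balance of the characters consumed since the last top-level comma; A's depth equals it
def pvBal (cs : List Char) : Int := (cs.count '(' : Int) - (cs.count ')' : Int)

-- final step of A after its loop
def pvAFin (st : List String × Int × List Char) : List String :=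
  if PySem.Chars.strip st.2.2 ≠ [] then st.1 ++ [String.ofList (PySem.Chars.strip st.2.2)] else st.1

-- final step of B after its loop
def pvBFin (st : List String × Option (List Char)) : List String :=
  match st.2 with
  | none =>
      let last := st.1.getLastD ""
      if last.toList ≠ [] then st.1.dropLast ++ [last] else st.1.dropLast
  | some b =>
      let last := PySem.Chars.strip b
      if last ≠ [] then st.1 ++ [String.ofList last] else st.1

lemma pv_count_go_single (c : Char) :
    ∀ (fuel : Nat) (l : List Char) (acc : Nat), l.length ≤ fuel →
      PySem.Chars.count.go [c] fuel l acc = acc + l.count c := by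
  intro fuel
  induction fuel with
  | zero =>
      intro l acc h
      have : l = [] := List.eq_nil_of_length_eq_zero (Nat.le_zero.mp h)
      subst this; simp [PySem.Chars.count.go]
  | succ n ih =>
      intro l acc h
      cases l with
      | nil => simp [PySem.Chars.count.go]
      | cons x t =>
          have ht : t.length ≤ n := by simp at h; omega
          simp only [PySem.Chars.count.go, List.isPrefixOf, Bool.and_true,
            List.length_cons, List.length_nil, Nat.zero_add, List.drop_succ_cons, List.drop_zero]
          by_cases hx : c = x
          · subst hx
            simp only [BEq.rfl, if_pos]
            rw [ih t (acc + 1) ht]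
            simp
            omega
          · have : (c == x) = false := by simp [hx]
            simp only [this, Bool.false_eq_true, if_false]
            rw [ih t acc ht]
            simp [Ne.symm hx]

lemma pv_count_single (l : List Char) (c : Char) :
    PySem.Chars.count l [c] = l.count c := by
  simp [PySem.Chars.count, List.isEmpty]
  rw [pv_count_go_single c l.length l 0 (le_refl _)]
  omega

lemma pv_modifyHead_id (ls : List (List Char)) :
    List.modifyHead (fun x => x) ls = ls := by
  cases ls <;> simp

lemma pv_splitOn_go_comma :
    ∀ (fuel : Nat) (l cur : List Char) (acc : List (List Char)), l.length < fuel →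
      PySem.Chars.splitOn.go [','] fuel l cur acc =
        acc.reverse ++ List.modifyHead (cur.reverse ++ ·) (l.splitOnP (· == ',')) := by
  intro fuel
  induction fuel with
  | zero => intro l cur acc h; omega
  | succ n ih =>
      intro l cur acc h
      cases l with
      | nil => simp [PySem.Chars.splitOn.go, List.splitOnP_nil]
      | cons x t =>
          have ht : t.length < n := by simp at h; omega
          simp only [PySem.Chars.splitOn.go, List.isPrefixOf, Bool.and_true, List.splitOnP_cons,
            List.length_cons, List.length_nil, Nat.zero_add, List.drop_succ_cons, List.drop_zero]
          by_cases hx : x = ','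
          · subst hx
            simp only [BEq.rfl, if_pos]
            rw [ih t [] (cur.reverse :: acc) ht]
            simp [pv_modifyHead_id]
          · have hb : (',' == x) = false := by simp [Ne.symm hx]
            have hb' : (x == ',') = false := by simp [hx]
            simp only [hb, hb', Bool.false_eq_true, if_false]
            rw [ih t (x :: cur) acc ht]
            rw [List.modifyHead_modifyHead]
            congr 1
            cases htl : t.splitOnP (· == ',') with
            | nil => exact absurd htl (List.splitOnP_ne_nil _ t)
            | cons hd tl => simp

lemma pv_splitOn_comma (l : List Char) :
    PySem.Chars.splitOn l [','] = l.splitOnP (· == ',') := by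
  have := pv_splitOn_go_comma (l.length + 1) l [] [] (by omega)
  simp only [PySem.Chars.splitOn] at *
  rw [this]
  cases h : l.splitOnP (· == ',') with
  | nil => exact absurd h (List.splitOnP_ne_nil _ l)
  | cons hd tl => simp

lemma pv_modifyHead_nil (ls : List (List Char)) :
    List.modifyHead (fun x => ([] : List Char) ++ x) ls = ls := by
  cases ls <;> simp

lemma pv_bal_append_single (cs : List Char) (c : Char) :
    pvBal (cs ++ [c]) =
      pvBal cs + (if c = '(' then 1 else 0) - (if c = ')' then 1 else 0) := by
  simp [pvBal, List.count_append, List.count_singleton]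
  by_cases h1 : c = '(' <;> by_cases h2 : c = ')' <;> simp_all <;> omega

lemma pv_bstep_test (b : List Char) :
    (PySem.Chars.count b ['('] = PySem.Chars.count b [')']) ↔ pvBal b = 0 := by
  rw [pv_count_single, pv_count_single]
  unfold pvBal
  omega

lemma pv_bstep_eq (r : List String) (buf : Option (List Char)) (pref cur : List Char)
    (hcur : cur = (match buf with | none => pref | some b => b ++ ',' :: pref)) :
    pvBStep (r, buf) pref =
      if pvBal cur = 0 then (r ++ [String.ofList (PySem.Chars.strip cur)], none)
      else (r, some cur) := by
  cases buf with
  | none =>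
      simp only at hcur; subst hcur
      by_cases hz : pvBal cur = 0
      · simp [pvBStep, (pv_bstep_test cur).mpr hz, hz]
      · have h : ¬ (PySem.Chars.count cur ['('] = PySem.Chars.count cur [')']) :=
          fun h => hz ((pv_bstep_test cur).mp h)
        simp [pvBStep, h, hz]
  | some old =>
      simp only at hcur; subst hcur
      by_cases hz : pvBal (old ++ ',' :: pref) = 0
      · simp [pvBStep, (pv_bstep_test _).mpr hz, hz]
      · have h : ¬ (PySem.Chars.count (old ++ ',' :: pref) ['('] = PySem.Chars.count (old ++ ',' :: pref) [')']) :=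
          fun h => hz ((pv_bstep_test _).mp h)
        simp [pvBStep, h, hz]

lemma pv_bfin_closed (r : List String) (l : List Char) :
    pvBFin (r ++ [String.ofList l], none) = if l ≠ [] then r ++ [String.ofList l] else r := by
  simp only [pvBFin, List.getLastD_concat, String.toList_ofList, List.dropLast_concat]

lemma pv_bfin_open (r : List String) (b : List Char) :
    pvBFin (r, some b) =
      if PySem.Chars.strip b ≠ [] then r ++ [String.ofList (PySem.Chars.strip b)] else r := rfl

lemma pv_afin_eq (r : List String) (d : Int) (cur : List Char) :
    pvAFin (r, d, cur) =
      if PySem.Chars.strip cur ≠ [] then r ++ [String.ofList (PySem.Chars.strip cur)] else r := rfl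

lemma pv_main (params : List Char) :
    ∀ (pref cur : List Char) (r : List String) (buf : Option (List Char)),
      cur = (match buf with | none => pref | some b => b ++ ',' :: pref) →
      pvAFin (params.foldl pvAStep (r, pvBal cur, cur)) =
        pvBFin ((List.modifyHead (pref ++ ·) (params.splitOnP (· == ','))).foldl pvBStep (r, buf)) := by
  induction params with
  | nil =>
      intro pref cur r buf hcur
      simp only [List.foldl_nil, List.splitOnP_nil, List.modifyHead, List.append_nil,
        List.foldl_cons]
      rw [pv_bstep_eq r buf pref cur hcur]
      by_cases hz : pvBal cur = 0
      · rw [if_pos hz, pv_bfin_closed, pv_afin_eq]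
      · rw [if_neg hz, pv_bfin_open, pv_afin_eq]
  | cons c rest ih =>
      intro pref cur r buf hcur
      by_cases hc : c = ','
      · subst hc
        simp only [List.splitOnP_cons, BEq.rfl, if_pos, List.modifyHead, List.append_nil,
          List.foldl_cons]
        rw [pv_bstep_eq r buf pref cur hcur]
        by_cases hz : pvBal cur = 0
        · -- top-level comma: both sides close the current segment
          have hA : pvAStep (r, pvBal cur, cur) ',' =
              (r ++ [String.ofList (PySem.Chars.strip cur)], pvBal cur, []) := by
            simp [pvAStep, hz]
          rw [hA, if_pos hz]
          have := ih [] [] (r ++ [String.ofList (PySem.Chars.strip cur)]) none rfl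
          rw [pv_modifyHead_nil] at this
          have h0 : pvBal ([] : List Char) = 0 := by simp [pvBal]
          rw [h0] at this
          rw [hz]
          exact this
        · -- comma at nonzero depth: A appends it to current, B keeps the buffer
          have hA : pvAStep (r, pvBal cur, cur) ',' = (r, pvBal cur, cur ++ [',']) := by
            simp [pvAStep, hz]
          rw [hA, if_neg hz]
          have hbal : pvBal cur = pvBal (cur ++ [',']) := by
            rw [pv_bal_append_single]; simp
          rw [hbal]
          have := ih [] (cur ++ [',']) r (some cur) (by simp)
          rwa [pv_modifyHead_nil] at this
      · -- a non-comma character extends the current piece on both sides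
        have hb' : (c == ',') = false := by simp [hc]
        simp only [List.splitOnP_cons, hb', Bool.false_eq_true, if_false,
          List.modifyHead_modifyHead]
        have hA : pvAStep (r, pvBal cur, cur) c = (r, pvBal (cur ++ [c]), cur ++ [c]) := by
          by_cases h1 : c = '(' <;> by_cases h2 : c = ')' <;>
            simp_all [pvAStep, pv_bal_append_single]
        rw [List.foldl_cons, hA]
        have hmod : ((pref ++ ·) ∘ (List.cons c)) = ((pref ++ [c]) ++ ·) := by
          funext t; simp
        rw [hmod]
        apply ih (pref ++ [c]) (cur ++ [c]) r buf
        cases buf <;> simp_all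

-- ===== VERDICT (by name: the statement is the Claim_ definition above) =====
theorem parse_param_types_py_spec : Claim_equal_parse_param_types_py := by
  intro signature _ _
  unfold Spec_parse_param_types_py parse_param_types_py parse_param_types_py_alt
  by_cases hp : pvParams signature = []
  · simp [hp]
  · simp only [hp, if_false]
    rw [pv_splitOn_comma]
    have := pv_main (pvParams signature) [] [] [] none rfl
    rw [pv_modifyHead_nil] at this
    simpa [pvAFin, pvBFin, pvBal] using this
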